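-- pv_equiv track=rewrite | github.com/Petrpejsek/ai-voice-block-combiner | backend/footage_director.py | contains_abstract_term
-- ===== SOURCE A (Python) =====
-- ABSTRACT_KEYWORD_BLACKLIST = [
--     "strategic", "strategy", "goal", "aim", "ambition", "policy", "intention",
--     "dominance", "influence", "control", "power", "pressure", "support", "impact",
--     "significance", "consequence", "outcome", "turning point", "tide",
-- ]
--
-- def contains_abstract_term(text: str) -> bool:
--     """
--     Returns True if text contains an abstract / non-visual concept from the blacklist.
--     We use substring match on lowercased text (covers multi-word phrases too).
--     """
--     if not text or not isinstance(text, str):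
--         return False
--     low = text.lower()
--     for t in ABSTRACT_KEYWORD_BLACKLIST:
--         if t.lower() in low:
--             return True
--     return False
-- ===== SOURCE B (Python) =====
-- ABSTRACT_KEYWORD_BLACKLIST = [
--     "strategic", "strategy", "goal", "aim", "ambition", "policy", "intention",
--     "dominance", "influence", "control", "power", "pressure", "support", "impact",
--     "significance", "consequence", "outcome", "turning point", "tide",
-- ]
--
--
-- def _build_trie(words):
--     # Prefix trie of all blacklist terms, built once at import time.
--     # None key marks "a term ends here".
--     root = {}
--     for w in words:
--         node = root
--         for ch in w:
--             node = node.setdefault(ch, {})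
--         node[None] = True
--     return root
--
--
-- _TRIE = _build_trie(ABSTRACT_KEYWORD_BLACKLIST)
--
--
-- def contains_abstract_term(text: str) -> bool:
--     # Walk the shared trie from each position of the lowercased text; the
--     # per-term inner scans of A disappear (shared prefixes are read once).
--     if not text or not isinstance(text, str):
--         return False
--     low = text.lower()
--     n = len(low)
--     for i in range(n):
--         node = _TRIE
--         j = i
--         while True:
--             if None in node:
--                 return True
--             if j >= n or low[j] not in node:
--                 break
--             node = node[low[j]]
--             j += 1
--     return False
-- ===== Notes on version B (the rewrite author's own statement) =====
-- stated objective: alternative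
-- what changed: A runs k independent substring scans (one per blacklist term) over the lowercased text; B builds a prefix trie of all terms once and walks that trie from each text position, so the inner loop over terms disappears and shared term prefixes are matched by a single automaton walk.
import Mathlib
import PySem

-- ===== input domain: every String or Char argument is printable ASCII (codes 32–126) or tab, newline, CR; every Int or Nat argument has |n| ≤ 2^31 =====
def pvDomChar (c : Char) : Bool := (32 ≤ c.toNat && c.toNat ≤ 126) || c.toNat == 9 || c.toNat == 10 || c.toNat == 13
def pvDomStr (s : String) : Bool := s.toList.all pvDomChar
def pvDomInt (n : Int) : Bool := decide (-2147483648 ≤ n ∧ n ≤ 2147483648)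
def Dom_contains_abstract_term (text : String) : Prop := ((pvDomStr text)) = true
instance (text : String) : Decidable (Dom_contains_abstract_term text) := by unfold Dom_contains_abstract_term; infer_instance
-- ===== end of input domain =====

-- B replaces A's per-term substring scans by one prefix trie of all terms, built once,
-- walked from each position of the lowercased text (alternative decomposition).

-- ===== PORT A =====
def ABSTRACT_KEYWORD_BLACKLIST : List String :=
  ["strategic", "strategy", "goal", "aim", "ambition", "policy", "intention",
   "dominance", "influence", "control", "power", "pressure", "support", "impact",
   "significance", "consequence", "outcome", "turning point", "tide"]

-- A: guard on empty text, then for each term t: if t.lower() in low: return True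
def contains_abstract_term (text : String) : Bool :=
  if text.toList = [] then false
  else
    let low := PySem.Str.lower text
    ABSTRACT_KEYWORD_BLACKLIST.any (fun t => PySem.Str.isIn (PySem.Str.lower t) low)

-- ===== PORT B =====
-- the blacklist terms as char lists (they are already lowercase)
def pvTerms : List (List Char) := ABSTRACT_KEYWORD_BLACKLIST.map String.toList

-- Source B's trie is a dict of children plus a terminal marker; nested inductives are not
-- allowed here, so the children dict is encoded first-child/next-sibling: each node
-- carries its char, its terminal flag, its first child and its next sibling.
inductive PvTrie where
  | nil : PvTrie
  | node : Char → Bool → PvTrie → PvTrie → PvTrie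
deriving DecidableEq, Repr

-- insert one word into the trie (Source B's inner loop of _build_trie: setdefault + marker)
def pvInsert : PvTrie → List Char → PvTrie
  | tr, [] => tr
  | .nil, x :: xs => .node x (decide (xs = [])) (pvInsert .nil xs) .nil
  | .node c term child sib, x :: xs =>
      if x = c then .node c (term || decide (xs = [])) (pvInsert child xs) sib
      else .node c term child (pvInsert sib (x :: xs))

-- the trie of all blacklist terms, built once (Source B's _TRIE)
def pvTrie : PvTrie := pvTerms.foldl pvInsert .nil

-- Source B's inner while loop: walk the trie along cs, True once a terminal flag is reached
def pvMatch : PvTrie → List Char → Bool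
  | .nil, _ => false
  | .node _ _ _ _, [] => false
  | .node c term child sib, x :: rest =>
      (if x = c then term || pvMatch child rest else false) || pvMatch sib (x :: rest)

-- Source B's outer for loop over the start positions i
def pvScan (cs : List Char) : Bool :=
  match cs with
  | [] => false
  | _ :: rest => pvMatch pvTrie cs || pvScan rest

def contains_abstract_term_alt (text : String) : Bool :=
  if text.toList = [] then false
  else pvScan (PySem.Str.lower text).toList

-- ===== PRECONDITION & SPEC =====
def Spec_contains_abstract_term (text : String) (out : Bool) : Prop := out = contains_abstract_term_alt text
instance (text : String) (out : Bool) : Decidable (Spec_contains_abstract_term text out) := by unfold Spec_contains_abstract_term; infer_instance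

-- ===== CLAIM (what is proved, stated in full; the proofs are below) =====
def Claim_equal_contains_abstract_term : Prop := ∀ (text : String), Dom_contains_abstract_term text → Spec_contains_abstract_term text (contains_abstract_term text)

-- ===== LEMMAS AND PROOFS =====

-- every blacklist term is nonempty
theorem pvTerms_ne_nil : ∀ t ∈ pvTerms, t ≠ [] := by decide

-- inserting w adds exactly the matches "w is a nonempty prefix of cs"
theorem pvMatch_insert : ∀ (w : List Char) (tr : PvTrie) (cs : List Char),
    pvMatch (pvInsert tr w) cs = true ↔ (w ≠ [] ∧ w <+: cs) ∨ pvMatch tr cs = true := by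
  intro w
  induction w with
  | nil => intro tr cs; simp [pvInsert]
  | cons x xs ihw =>
    intro tr
    induction tr with
    | nil =>
      intro cs
      cases cs with
      | nil => simp [pvInsert, pvMatch]
      | cons y rest =>
        by_cases hy : y = x
        · subst hy
          have hnp : xs = [] → xs <+: rest := fun h => h ▸ List.nil_prefix
          simp [pvInsert, pvMatch, ihw, List.cons_prefix_cons]
          tauto
        · have hxy : ¬ (x = y) := fun h => hy h.symm
          simp [pvInsert, pvMatch, hy, hxy, List.cons_prefix_cons]
    | node c term child sib ihc ihs =>
      intro cs
      by_cases h : x = c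
      · subst h
        cases cs with
        | nil => simp [pvInsert, pvMatch]
        | cons y rest =>
          by_cases hy : y = x
          · subst hy
            have hnp : xs = [] → xs <+: rest := fun h => h ▸ List.nil_prefix
            simp [pvInsert, pvMatch, ihw, List.cons_prefix_cons]
            tauto
          · have hxy : ¬ (x = y) := fun hh => hy hh.symm
            simp [pvInsert, pvMatch, hy, hxy, List.cons_prefix_cons]
      · cases cs with
        | nil => simp [pvInsert, pvMatch, h]
        | cons y rest =>
          simp [pvInsert, pvMatch, h, ihs, List.cons_prefix_cons]
          tauto
-- folding insert over a word list collects all their prefix-matches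
theorem pvMatch_foldl : ∀ (ws : List (List Char)) (tr : PvTrie) (cs : List Char),
    pvMatch (ws.foldl pvInsert tr) cs = true ↔
      (∃ w ∈ ws, w ≠ [] ∧ w <+: cs) ∨ pvMatch tr cs = true := by
  intro ws
  induction ws with
  | nil => simp
  | cons w ws ih =>
    intro tr cs
    simp only [List.foldl_cons, ih, pvMatch_insert, List.mem_cons]
    constructor
    · rintro (⟨v, hv, hne, hp⟩ | ⟨hne, hp⟩ | hs)
      · exact Or.inl ⟨v, Or.inr hv, hne, hp⟩
      · exact Or.inl ⟨w, Or.inl rfl, hne, hp⟩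
      · exact Or.inr hs
    · rintro (⟨v, (rfl | hv), hne, hp⟩ | hs)
      · exact Or.inr (Or.inl ⟨hne, hp⟩)
      · exact Or.inl ⟨v, hv, hne, hp⟩
      · exact Or.inr (Or.inr hs)

-- the built trie matches cs iff some blacklist term is a prefix of cs
theorem pvMatch_trie (cs : List Char) :
    pvMatch pvTrie cs = true ↔ ∃ t ∈ pvTerms, t <+: cs := by
  unfold pvTrie
  rw [pvMatch_foldl]
  simp only [pvMatch, Bool.false_eq_true, or_false]
  exact ⟨fun ⟨w, hw, _, hp⟩ => ⟨w, hw, hp⟩, fun ⟨w, hw, hp⟩ => ⟨w, hw, pvTerms_ne_nil w hw, hp⟩⟩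

-- the position scan finds a term iff some term is a prefix of some suffix
theorem pvScan_iff (cs : List Char) :
    pvScan cs = true ↔ ∃ t ∈ pvTerms, ∃ j, t <+: cs.drop j := by
  induction cs with
  | nil =>
    simp only [pvScan, Bool.false_eq_true, false_iff]
    rintro ⟨t, ht, j, hp⟩
    exact pvTerms_ne_nil t ht (List.prefix_nil.mp (by simpa using hp))
  | cons c rest ih =>
    simp only [pvScan, Bool.or_eq_true, pvMatch_trie, ih]
    constructor
    · rintro (⟨t, ht, hp⟩ | ⟨t, ht, j, hp⟩)
      · exact ⟨t, ht, 0, by simpa using hp⟩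
      · exact ⟨t, ht, j + 1, by simpa using hp⟩
    · rintro ⟨t, ht, j, hp⟩
      cases j with
      | zero => exact Or.inl ⟨t, ht, by simpa using hp⟩
      | succ j' => exact Or.inr ⟨t, ht, j', by simpa using hp⟩

-- lowering the (already lowercase) literal terms is the identity
theorem pvLower_terms :
    ABSTRACT_KEYWORD_BLACKLIST.map (fun t => (PySem.Str.lower t).toList) = pvTerms := by
  decide

-- ===== VERDICT (by name: the statement is the Claim_ definition above) =====
theorem contains_abstract_term_spec : Claim_equal_contains_abstract_term := by
  intro text _
  unfold Spec_contains_abstract_term contains_abstract_term contains_abstract_term_alt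
  by_cases h : text.toList = []
  · simp [h]
  · simp only [h, if_false]
    rw [Bool.eq_iff_iff, pvScan_iff]
    constructor
    · intro hA
      rcases List.any_eq_true.mp hA with ⟨s, hs, hin⟩
      rw [PySem.Str.isIn_eq] at hin
      rcases (PySem.Chars.exists_prefix_drop_iff_isIn _ _).mpr hin with ⟨j, hp⟩
      exact ⟨(PySem.Str.lower s).toList, pvLower_terms ▸ List.mem_map_of_mem hs, j, hp⟩
    · rintro ⟨t, ht, j, hp⟩
      rcases List.mem_map.mp (pvLower_terms ▸ ht) with ⟨s, hs, rfl⟩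
      refine List.any_eq_true.mpr ⟨s, hs, ?_⟩
      rw [PySem.Str.isIn_eq]
      exact (PySem.Chars.exists_prefix_drop_iff_isIn _ _).mp ⟨j, hp⟩
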